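-- pv_equiv track=rewrite | github.com/JimPaine/adventofcode2025 | day3.py | _get_next_largest
-- ===== SOURCE A (Python) =====
-- def _get_next_largest(line: str, s: int, e: int) -> tuple[int, int]:
--     value = 0
--     index = 0
--
--     for i in range(s, e):
--         if int(line[i]) > value:
--             value = int(line[i])
--             index = i
--
--     return value, index
-- ===== SOURCE B (Python) =====
-- def _get_next_largest(line: str, s: int, e: int) -> tuple[int, int]:
--     digits = [int(line[i]) for i in range(s, e)]
--     value = max(digits, default=0)
--     index = s + digits.index(value) if value > 0 else 0
--     return value, index
-- ===== Notes on version B (the rewrite author's own statement) =====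
-- stated objective: idiomatic
-- what changed: Replaces the fused single-scan running-maximum loop with a two-pass decomposition: build the digit list, take max(..., default=0), then locate the first occurrence with list.index (index 0 when the max is 0 or the range is empty, as in A).
import Mathlib
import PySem

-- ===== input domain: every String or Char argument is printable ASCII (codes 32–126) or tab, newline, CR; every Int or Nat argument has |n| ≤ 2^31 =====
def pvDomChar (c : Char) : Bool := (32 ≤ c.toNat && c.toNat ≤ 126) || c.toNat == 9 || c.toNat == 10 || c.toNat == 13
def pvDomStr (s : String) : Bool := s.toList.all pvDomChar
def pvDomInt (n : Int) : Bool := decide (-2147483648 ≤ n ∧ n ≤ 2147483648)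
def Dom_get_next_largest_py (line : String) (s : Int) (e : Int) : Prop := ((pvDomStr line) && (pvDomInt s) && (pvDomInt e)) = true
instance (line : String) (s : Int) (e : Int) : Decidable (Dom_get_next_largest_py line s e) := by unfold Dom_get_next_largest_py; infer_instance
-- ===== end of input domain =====

-- B replaces A's fused running-maximum scan with a two-pass max-then-locate decomposition (same cost, more idiomatic).

-- ===== PORT A =====
-- int(line[i]): IndexError / ValueError become none in PySem; the .getD 0 default is only
-- reached outside Pre_ (where the Python raises), so both ports are exact on Pre_.
def pyDigit (line : String) (i : Int) : Int :=
  ((PySem.Str.pyGet? line i).bind (fun c => PySem.Int.ofChars? [c])).getD 0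

def get_next_largest_py (line : String) (s : Int) (e : Int) : Int × Int :=
  (PySem.List.pyRange s e 1).foldl
    (fun (vi : Int × Int) (i : Int) =>
      if pyDigit line i > vi.1 then (pyDigit line i, i) else vi)
    (0, 0)

-- ===== PORT B =====
def get_next_largest_py_alt (line : String) (s : Int) (e : Int) : Int × Int :=
  let digits : List Int := (PySem.List.pyRange s e 1).map (pyDigit line)
  let value : Int := (PySem.List.max? digits (fun x => x)).getD 0
  let index : Int := if value > 0 then s + (((PySem.List.index? digits value).getD 0 : Nat) : Int) else 0
  (value, index)

-- ===== PRECONDITION & SPEC =====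
-- Pre_: every index in range(s, e) is a valid (possibly negative, Python-wrapping) index into
-- line and that character is an ASCII digit — exactly the inputs on which the Python A returns
-- (elsewhere int(line[i]) raises IndexError or ValueError).
def Pre_get_next_largest_py (line : String) (s : Int) (e : Int) : Prop :=
  e ≤ s ∨ ((-(line.toList.length : Int) ≤ s ∧ e ≤ (line.toList.length : Int)) ∧
    ((PySem.List.pyRange s e 1).all (fun i =>
      ((PySem.Str.pyGet? line i).map (fun c => decide ('0' ≤ c ∧ c ≤ '9'))).getD false)) = true)
instance (line : String) (s : Int) (e : Int) : Decidable (Pre_get_next_largest_py line s e) := by unfold Pre_get_next_largest_py; infer_instance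

def pvWitness_get_next_largest_py : String × Int × Int := ("35192", 1, 4)

def Spec_get_next_largest_py (line : String) (s : Int) (e : Int) (out : Int × Int) : Prop := out = get_next_largest_py_alt line s e
instance (line : String) (s : Int) (e : Int) (out : Int × Int) : Decidable (Spec_get_next_largest_py line s e out) := by unfold Spec_get_next_largest_py; infer_instance

-- ===== CLAIM (what is proved, stated in full; the proofs are below) =====
def Claim_equal_get_next_largest_py : Prop := ∀ (line : String) (s : Int) (e : Int), Dom_get_next_largest_py line s e → Pre_get_next_largest_py line s e → Spec_get_next_largest_py line s e (get_next_largest_py line s e)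

-- ===== LEMMAS AND PROOFS =====

-- A's loop, restated over the precomputed digit list (s tracks the current range position).
def pvGoA (s : Int) (ds : List Int) (acc : Int × Int) : Int × Int :=
  match ds with
  | [] => acc
  | d :: t => pvGoA (s + 1) t (if d > acc.1 then (d, s) else acc)

lemma pvBridgeA (line : String) : ∀ (n : Nat) (s e : Int), (e - s).toNat = n → ∀ acc,
    (PySem.List.pyRange s e 1).foldl
      (fun (vi : Int × Int) (i : Int) =>
        if pyDigit line i > vi.1 then (pyDigit line i, i) else vi) acc
    = pvGoA s ((PySem.List.pyRange s e 1).map (pyDigit line)) acc := by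
  intro n
  induction n with
  | zero =>
    intro s e h acc
    rw [PySem.List.pyRange_one_eq_nil (by omega)]
    simp [pvGoA]
  | succ k ih =>
    intro s e h acc
    rw [PySem.List.pyRange_one_cons (by omega)]
    simp only [List.foldl_cons, List.map_cons, pvGoA]
    exact ih (s + 1) e (by omega) _

lemma pvFoldlMaxPull (t : List Int) (a b : Int) :
    t.foldl max (max a b) = max a (t.foldl max b) := by
  induction t generalizing b with
  | nil => simp
  | cons c t ih => simp only [List.foldl_cons, max_assoc, ih]

lemma pvIndexGetD (t : List Int) (m : Int) (hm : m ∈ t) :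
    ∃ k : Nat, PySem.List.index? t m = some k := by
  have h := (PySem.List.index?_isSome_iff t m).2 hm
  exact Option.isSome_iff_exists.1 h

lemma pvGoA_spec : ∀ (ds : List Int) (s v idx : Int), 0 ≤ v → (∀ d ∈ ds, 0 ≤ d) →
    pvGoA s ds (v, idx) =
      (if v < ds.foldl max v
        then (ds.foldl max v, s + (((PySem.List.index? ds (ds.foldl max v)).getD 0 : Nat) : Int))
        else (v, idx)) := by
  intro ds
  induction ds with
  | nil => intro s v idx _ _; simp [pvGoA]
  | cons d t ih =>
    intro s v idx hv hnn
    have hd0 : 0 ≤ d := hnn d (by simp)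
    have ht : ∀ x ∈ t, 0 ≤ x := fun x hx => hnn x (by simp [hx])
    simp only [pvGoA, List.foldl_cons]
    by_cases hd : v < d
    · rw [if_pos (show d > v from hd), max_eq_right (le_of_lt hd)]
      rw [ih (s + 1) d s hd0 ht]
      by_cases hm : d < t.foldl max d
      · have hmem : t.foldl max d ∈ t := by
          rcases PySem.List.foldl_max_mem t d with h | h
          · omega
          · exact h
        have hne : d ≠ t.foldl max d := by omega
        obtain ⟨k, hk⟩ := pvIndexGetD t (t.foldl max d) hmem
        rw [if_pos hm, if_pos (lt_trans hd hm), PySem.List.index?_cons_of_ne t hne, hk]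
        simp only [Option.map_some, Option.getD_some]
        refine Prod.ext rfl ?_
        push_cast; ring
      · have heq : t.foldl max d = d := by
          have h1 := (PySem.List.le_foldl_max t d).1
          omega
        rw [if_neg hm, heq, if_pos hd, PySem.List.index?_cons_self]
        simp
    · rw [if_neg (show ¬ d > v from hd)]
      have hvd : max v d = v := by omega
      rw [hvd, ih (s + 1) v idx hv ht]
      by_cases hm : v < t.foldl max v
      · have hmem : t.foldl max v ∈ t := by
          rcases PySem.List.foldl_max_mem t v with h | h
          · omega
          · exact h
        have hne : d ≠ t.foldl max v := by omega
        obtain ⟨k, hk⟩ := pvIndexGetD t (t.foldl max v) hmem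
        rw [if_pos hm, if_pos hm, PySem.List.index?_cons_of_ne t hne, hk]
        simp only [Option.map_some, Option.getD_some]
        refine Prod.ext rfl ?_
        push_cast; ring
      · rw [if_neg hm, if_neg hm]

lemma pvDigitNonneg (c : Char) (h1 : '0' ≤ c) (h2 : c ≤ '9') :
    0 ≤ (PySem.Int.ofChars? [c]).getD 0 := by
  have hn1 : 48 ≤ c.toNat := h1
  have hn2 : c.toNat ≤ 57 := h2
  have hc : Char.ofNat c.toNat = c := Char.ofNat_toNat c
  interval_cases h : c.toNat <;> rw [← hc] <;> decide

-- A's characterized loop result equals B's max-then-locate computation, over any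
-- nonnegative digit list.
lemma pvMain (ds : List Int) (s : Int) (hnn : ∀ d ∈ ds, 0 ≤ d) :
    (if 0 < ds.foldl max 0
      then (ds.foldl max 0, s + (((PySem.List.index? ds (ds.foldl max 0)).getD 0 : Nat) : Int))
      else ((0 : Int), (0 : Int)))
    = (let digits : List Int := ds
       let value : Int := (PySem.List.max? digits (fun x => x)).getD 0
       let index : Int := if value > 0 then s + (((PySem.List.index? digits value).getD 0 : Nat) : Int) else 0
       (value, index)) := by
  cases ds with
  | nil => simp [PySem.List.max?]
  | cons x t =>
    have hx0 : 0 ≤ x := hnn x (by simp)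
    have hxM : x ≤ t.foldl max x := (PySem.List.le_foldl_max t x).1
    show _ = ((PySem.List.max? (x :: t) (fun x => x)).getD 0,
      if (PySem.List.max? (x :: t) (fun x => x)).getD 0 > 0
        then s + (((PySem.List.index? (x :: t) ((PySem.List.max? (x :: t) (fun x => x)).getD 0)).getD 0 : Nat) : Int)
        else 0)
    rw [PySem.List.max?_id_cons]
    simp only [Option.getD_some, List.foldl_cons]
    have hpull : t.foldl max (max 0 x) = max 0 (t.foldl max x) := pvFoldlMaxPull t 0 x
    by_cases hM : 0 < t.foldl max x
    · have hm : max 0 (t.foldl max x) = t.foldl max x := by omega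
      rw [hpull, hm, if_pos hM, if_pos hM]
    · have hMz : t.foldl max x = 0 := by omega
      rw [hpull, hMz]
      simp

-- ===== VERDICT (by name: the statement is the Claim_ definition above) =====
theorem get_next_largest_py_spec : Claim_equal_get_next_largest_py := by
  intro line s e _ hpre
  unfold Spec_get_next_largest_py get_next_largest_py get_next_largest_py_alt
  have hall : ∀ i ∈ PySem.List.pyRange s e 1,
      ((PySem.Str.pyGet? line i).map (fun c => decide ('0' ≤ c ∧ c ≤ '9'))).getD false = true := by
    rcases hpre with h | ⟨-, hall⟩
    · intro i hi
      rw [PySem.List.pyRange_one_eq_nil h] at hi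
      cases hi
    · exact List.all_eq_true.1 hall
  have hnn : ∀ d ∈ (PySem.List.pyRange s e 1).map (pyDigit line), 0 ≤ d := by
    intro d hd
    obtain ⟨i, hi, hdi⟩ := List.mem_map.1 hd
    have hi' := hall i hi
    cases hc : PySem.Str.pyGet? line i with
    | none => rw [hc] at hi'; simp at hi'
    | some c =>
      rw [hc] at hi'; simp at hi'
      rw [← hdi]
      unfold pyDigit
      rw [hc]
      exact pvDigitNonneg c hi'.1 hi'.2
  rw [pvBridgeA line (e - s).toNat s e rfl,
    pvGoA_spec ((PySem.List.pyRange s e 1).map (pyDigit line)) s 0 0 le_rfl hnn]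
  exact pvMain ((PySem.List.pyRange s e 1).map (pyDigit line)) s hnn
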